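-- pv_equiv track=rewrite | github.com/viveshok/codejam | Haircut/main.py | minutes
-- ===== SOURCE A (Python) =====
-- import collections
--
-- def minutes(N, Ms):
--     minutes_ = collections.defaultdict(int)
--     minutes_[0] = len(Ms)
--     for i in range(1, N*10000):
--         for M,freq in Ms.items():
--             if M%i==0:
--                 minutes_[i] += freq
--
-- #    upper_bound = min(N*min(Ms), 10000000000)
-- #    for M,freq in Ms.items():
-- #        for i in range(0, upper_bound, M):
-- #            minutes_[i] += freq
--
--     return minutes_
-- ===== SOURCE B (Python) =====
-- import collections
--
-- def minutes(N, Ms):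
--     # Per-barber divisor enumeration in O(sqrt(|M|)) instead of scanning all of range(1, N*10000).
--     L = N * 10000
--     counts = {}
--     for M, freq in Ms.items():
--         if M == 0:
--             for i in range(1, L):
--                 counts[i] = counts.get(i, 0) + freq
--         else:
--             a = abs(M)
--             small = []
--             large = []
--             d = 1
--             while d * d <= a:
--                 if a % d == 0:
--                     if d < L:
--                         small.append(d)
--                     e = a // d
--                     if e != d and e < L:
--                         large.append(e)
--                 d += 1
--             for i in small + large:
--                 counts[i] = counts.get(i, 0) + freq
--     result = collections.defaultdict(int)
--     result[0] = len(Ms)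
--     for i in sorted(counts):
--         result[i] = counts[i]
--     return result
-- ===== Notes on version B (the rewrite author's own statement) =====
-- stated objective: faster
-- what changed: Instead of scanning every i in range(1, N*10000) and testing each barber for divisibility, B enumerates each barber's divisors in O(sqrt(|M|)) (pairs d and M//d), accumulates frequencies per divisor in a dict, and emits the keys in sorted order (plus the full range only for the exceptional barber M=0).
import Mathlib
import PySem

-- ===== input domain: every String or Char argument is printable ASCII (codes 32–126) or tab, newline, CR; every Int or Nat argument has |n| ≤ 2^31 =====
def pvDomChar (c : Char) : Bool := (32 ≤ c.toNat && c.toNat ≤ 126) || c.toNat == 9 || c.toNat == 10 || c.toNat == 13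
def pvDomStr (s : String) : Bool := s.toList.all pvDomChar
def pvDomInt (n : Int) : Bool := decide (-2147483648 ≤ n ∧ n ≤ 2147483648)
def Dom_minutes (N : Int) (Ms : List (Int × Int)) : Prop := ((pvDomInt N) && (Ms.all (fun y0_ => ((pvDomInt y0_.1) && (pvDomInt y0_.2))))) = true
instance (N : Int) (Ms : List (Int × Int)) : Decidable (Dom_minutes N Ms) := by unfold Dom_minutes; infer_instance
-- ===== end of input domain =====

-- B replaces A's scan of every i in range(1, N*10000) by per-barber divisor enumeration
-- in O(sqrt(|M|)) with a sorted emission of the accumulated keys (objective: faster).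


-- ===== PORT A =====
-- minutes_ = defaultdict(int); minutes_[0] = len(Ms);
-- for i in range(1, N*10000): for M,freq in Ms.items(): if M%i==0: minutes_[i] += freq
def minutes (N : Int) (Ms : List (Int × Int)) : List (Int × Int) :=
  let d0 : PySem.Dict Int Int := PySem.Dict.empty.insert 0 (Ms.length : Int)
  let d := (PySem.List.pyRange 1 (N * 10000)).foldl
    (fun d i => Ms.foldl
      (fun d p => if PySem.Int.mod p.1 i == 0 then d.modify i 0 (· + p.2) else d) d) d0
  d.items

-- ===== PORT B =====
-- B's 'while d*d <= a' loop collecting small (ascending) and large (descending) divisors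
-- of a = abs(M), each filtered by '< L'. Nat is exact here: a = |M| ≥ 0 and d ≥ 1.
def divLoop (L : Int) (a : Nat) (d : Nat) : List Int × List Int :=
  if _h : d * d ≤ a then
    let rest := divLoop L a (d + 1)
    if a % d = 0 then
      let s := if (d : Int) < L then (d : Int) :: rest.1 else rest.1
      let e := a / d
      let l := if e ≠ d ∧ (e : Int) < L then (e : Int) :: rest.2 else rest.2
      (s, l)
    else rest
  else ([], [])
termination_by a + 1 - d * d
decreasing_by
  have hd : d * d < (d + 1) * (d + 1) := by nlinarith
  omega

def minutes_alt (N : Int) (Ms : List (Int × Int)) : List (Int × Int) :=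
  let L := N * 10000
  let counts := Ms.foldl (fun c p =>
      if p.1 = 0 then
        (PySem.List.pyRange 1 L).foldl (fun c i => c.insert i (c.getD i 0 + p.2)) c
      else
        let dl := divLoop L p.1.natAbs 1
        (dl.1 ++ dl.2).foldl (fun c i => c.insert i (c.getD i 0 + p.2)) c)
    (PySem.Dict.empty : PySem.Dict Int Int)
  let result := (PySem.List.sorted counts.keys (fun x => x)).foldl
      (fun r i => r.insert i (counts.getD i 0))
      ((PySem.Dict.empty : PySem.Dict Int Int).insert 0 (Ms.length : Int))
  result.items

-- ===== PRECONDITION & SPEC =====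
def Spec_minutes (N : Int) (Ms : List (Int × Int)) (out : List (Int × Int)) : Prop := out = minutes_alt N Ms
instance (N : Int) (Ms : List (Int × Int)) (out : List (Int × Int)) : Decidable (Spec_minutes N Ms out) := by unfold Spec_minutes; infer_instance

-- ===== CLAIM (what is proved, stated in full; the proofs are below) =====
def Claim_equal_minutes : Prop := ∀ (N : Int) (Ms : List (Int × Int)), Dom_minutes N Ms → Spec_minutes N Ms (minutes N Ms)

-- ===== LEMMAS AND PROOFS =====

-- total frequency of barbers M in Ms with v ∣ M
def pvS (v : Int) : List (Int × Int) → Int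
  | [] => 0
  | p :: t => (if v ∣ p.1 then p.2 else 0) + pvS v t

-- the common normal form of both results
def pvT (L : Int) (Ms : List (Int × Int)) : List (Int × Int) :=
  (0, (Ms.length : Int)) ::
    ((PySem.List.pyRange 1 L).filter (fun i => Ms.any (fun p => decide (i ∣ p.1)))).map
      (fun i => (i, pvS i Ms))

theorem pv_modEq (a i : Int) : (PySem.Int.mod a i == 0) = decide (i ∣ a) := by
  by_cases h : i ∣ a
  · simp [h, (PySem.Int.mod_eq_zero_iff_dvd a i).2 h]
  · simp [h]
    intro hc
    exact h ((PySem.Int.mod_eq_zero_iff_dvd a i).1 hc)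

-- ---------- A side ----------

theorem innerA_getD_ne (i : Int) (Ms : List (Int × Int)) :
    ∀ (d : PySem.Dict Int Int) (j : Int), j ≠ i →
      (Ms.foldl (fun d p => if PySem.Int.mod p.1 i == 0 then d.modify i 0 (· + p.2) else d) d).getD j 0
        = d.getD j 0 := by
  induction Ms with
  | nil => intro d j hj; simp
  | cons p t ih =>
    intro d j hj
    simp only [List.foldl_cons]
    rw [ih _ _ hj]
    split
    · exact PySem.Dict.getD_modify_of_ne d 0 _ hj
    · rfl

theorem innerA_getD_self (i : Int) (Ms : List (Int × Int)) :
    ∀ (d : PySem.Dict Int Int),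
      (Ms.foldl (fun d p => if PySem.Int.mod p.1 i == 0 then d.modify i 0 (· + p.2) else d) d).getD i 0
        = d.getD i 0 + pvS i Ms := by
  induction Ms with
  | nil => intro d; simp [pvS]
  | cons p t ih =>
    intro d
    simp only [List.foldl_cons]
    rw [ih, pv_modEq, pvS]
    by_cases h : i ∣ p.1
    · simp [h, PySem.Dict.getD_modify_self]
      ring
    · simp [h]

theorem innerA_keys_mem (i : Int) (Ms : List (Int × Int)) :
    ∀ (d : PySem.Dict Int Int), i ∈ d.keys →
      (Ms.foldl (fun d p => if PySem.Int.mod p.1 i == 0 then d.modify i 0 (· + p.2) else d) d).keys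
        = d.keys := by
  induction Ms with
  | nil => intro d _; rfl
  | cons p t ih =>
    intro d hd
    simp only [List.foldl_cons]
    split
    · rw [ih _ (by rw [PySem.Dict.keys_modify,
          PySem.Dict.keys_insert_of_contains _ _ ((PySem.Dict.contains_iff_mem_keys d i).2 hd)]; exact hd),
        PySem.Dict.keys_modify,
        PySem.Dict.keys_insert_of_contains _ _ ((PySem.Dict.contains_iff_mem_keys d i).2 hd)]
    · exact ih _ hd

theorem innerA_keys (i : Int) (Ms : List (Int × Int)) :
    ∀ (d : PySem.Dict Int Int), i ∉ d.keys →
      (Ms.foldl (fun d p => if PySem.Int.mod p.1 i == 0 then d.modify i 0 (· + p.2) else d) d).keys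
        = if Ms.any (fun p => decide (i ∣ p.1)) then d.keys ++ [i] else d.keys := by
  induction Ms with
  | nil => intro d _; simp
  | cons p t ih =>
    intro d hd
    have hc : d.contains i = false := by
      rcases h : d.contains i with _ | _
      · rfl
      · exact absurd ((PySem.Dict.contains_iff_mem_keys d i).1 h) hd
    simp only [List.foldl_cons]
    rw [pv_modEq p.1 i]
    by_cases hdiv : i ∣ p.1
    · have hk : (d.modify i 0 (· + p.2)).keys = d.keys ++ [i] := by
        rw [PySem.Dict.keys_modify, PySem.Dict.keys_insert_of_not_contains _ _ hc]
      rw [if_pos (by simp [hdiv]), innerA_keys_mem i t _ (by rw [hk]; simp), hk]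
      simp [hdiv]
    · rw [if_neg (by simp [hdiv]), ih _ hd]
      simp only [List.any_cons, hdiv, decide_false, Bool.false_or]

-- the outer loop over range(a, L)
theorem outerA_spec (L : Int) (Ms : List (Int × Int)) :
    ∀ (n : Nat) (a : Int) (d : PySem.Dict Int Int), (L - a).toNat = n →
      (∀ j ∈ d.keys, j < a) →
      ((PySem.List.pyRange a L).foldl
          (fun d i => Ms.foldl
            (fun d p => if PySem.Int.mod p.1 i == 0 then d.modify i 0 (· + p.2) else d) d) d).keys
        = d.keys ++ (PySem.List.pyRange a L).filter (fun i => Ms.any (fun p => decide (i ∣ p.1)))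
      ∧ (∀ j : Int, j < a →
          ((PySem.List.pyRange a L).foldl
            (fun d i => Ms.foldl
              (fun d p => if PySem.Int.mod p.1 i == 0 then d.modify i 0 (· + p.2) else d) d) d).getD j 0
          = d.getD j 0)
      ∧ (∀ i : Int, a ≤ i → i < L →
          ((PySem.List.pyRange a L).foldl
            (fun d i => Ms.foldl
              (fun d p => if PySem.Int.mod p.1 i == 0 then d.modify i 0 (· + p.2) else d) d) d).getD i 0
          = pvS i Ms) := by
  intro n
  induction n with
  | zero =>
    intro a d hn _
    have hL : L ≤ a := by omega
    rw [PySem.List.pyRange_one_eq_nil hL]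
    refine ⟨by simp, fun j _ => rfl, fun i hai hiL => by omega⟩
  | succ n ih =>
    intro a d hn hb
    by_cases hL : L ≤ a
    · rw [PySem.List.pyRange_one_eq_nil hL]
      refine ⟨by simp, fun j _ => rfl, fun i hai hiL => by omega⟩
    · have haL : a < L := by omega
      rw [PySem.List.pyRange_one_cons haL]
      simp only [List.foldl_cons, List.filter_cons]
      have hna : a ∉ d.keys := fun h => absurd (hb a h) (by omega)
      have hca : d.contains a = false := by
        rcases h : d.contains a with _ | _
        · rfl
        · exact absurd ((PySem.Dict.contains_iff_mem_keys d a).1 h) hna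
      have hk' := innerA_keys a Ms d hna
      have hb' : ∀ j ∈ (Ms.foldl
          (fun d p => if PySem.Int.mod p.1 a == 0 then d.modify a 0 (· + p.2) else d) d).keys,
          j < a + 1 := by
        intro j hj
        rw [hk'] at hj
        split at hj
        · rcases List.mem_append.1 hj with h | h
          · exact lt_trans (hb j h) (by omega)
          · simp at h; omega
        · exact lt_trans (hb j hj) (by omega)
      obtain ⟨ihk, ihlow, ihmid⟩ := ih (a + 1)
        (Ms.foldl (fun d p => if PySem.Int.mod p.1 a == 0 then d.modify a 0 (· + p.2) else d) d)
        (by omega) hb'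
      refine ⟨?_, ?_, ?_⟩
      · rw [ihk, hk']
        by_cases hany : Ms.any (fun p => decide (a ∣ p.1)) = true
        · rw [if_pos hany, if_pos (by simpa using hany)]
          simp
        · rw [if_neg hany, if_neg (by simpa using hany)]
      · intro j hj
        rw [ihlow j (by omega)]
        exact innerA_getD_ne a Ms d j (by omega)
      · intro i hai hiL
        rcases eq_or_lt_of_le hai with h | h
        · subst h
          rw [ihlow a (by omega), innerA_getD_self,
            PySem.Dict.getD_of_not_contains d 0 hca, zero_add]
        · exact ihmid i (by omega) hiL

theorem minutes_eq_pvT (N : Int) (Ms : List (Int × Int)) :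
    minutes N Ms = pvT (N * 10000) Ms := by
  unfold minutes pvT
  have hk0 : ((PySem.Dict.empty : PySem.Dict Int Int).insert 0 (Ms.length : Int)).keys = [0] := by
    rw [PySem.Dict.keys_insert_of_not_contains _ _ (PySem.Dict.contains_empty 0),
      PySem.Dict.keys_empty]
    rfl
  have hb : ∀ j ∈ ((PySem.Dict.empty : PySem.Dict Int Int).insert 0 (Ms.length : Int)).keys,
      j < 1 := by
    rw [hk0]; intro j hj; simp at hj; omega
  obtain ⟨hkeys, hlow, hmid⟩ := outerA_spec (N * 10000) Ms (N * 10000 - 1).toNat 1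
    ((PySem.Dict.empty : PySem.Dict Int Int).insert 0 (Ms.length : Int)) rfl hb
  rw [hk0] at hkeys
  have hsub : ∀ i ∈ (PySem.List.pyRange 1 (N * 10000)).filter
      (fun i => Ms.any (fun p => decide (i ∣ p.1))), 1 ≤ i ∧ i < N * 10000 := by
    intro i hi
    exact PySem.List.mem_pyRange_one.1 (List.mem_of_mem_filter hi)
  have hnodup : (([0] : List Int) ++ (PySem.List.pyRange 1 (N * 10000)).filter
      (fun i => Ms.any (fun p => decide (i ∣ p.1)))).Nodup := by
    refine List.Nodup.append (by simp) ((PySem.List.nodup_pyRange_one 1 (N * 10000)).filter _) ?_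
    intro j hj hj'
    simp at hj
    subst hj
    have := hsub 0 hj'
    omega
  rw [PySem.Dict.items_eq_map_keys _ (by rw [hkeys]; exact hnodup) 0, hkeys, List.map_append]
  have h0 : ((PySem.List.pyRange 1 (N * 10000)).foldl
      (fun d i => Ms.foldl
        (fun d p => if PySem.Int.mod p.1 i == 0 then d.modify i 0 (· + p.2) else d) d)
      ((PySem.Dict.empty : PySem.Dict Int Int).insert 0 (Ms.length : Int))).getD 0 0
      = (Ms.length : Int) := by
    rw [hlow 0 (by omega), PySem.Dict.getD_insert]
    simp
  rw [List.map_singleton, h0]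
  refine congrArg _ (List.map_congr_left ?_)
  intro i hi
  obtain ⟨h1, h2⟩ := hsub i hi
  rw [hmid i h1 h2]

-- ---------- B side ----------

-- characterisation of divLoop
theorem divLoop_spec (L : Int) (a : Nat) (ha : 0 < a) :
    ∀ (n : Nat) (d : Nat), a + 1 - d * d = n → 1 ≤ d →
      (∀ i : Int, i ∈ (divLoop L a d).1 ↔
        ∃ m : Nat, i = (m : Int) ∧ d ≤ m ∧ m * m ≤ a ∧ m ∣ a ∧ (m : Int) < L)
      ∧ (∀ i : Int, i ∈ (divLoop L a d).2 ↔
        ∃ m : Nat, i = (m : Int) ∧ m ∣ a ∧ a < m * m ∧ d ≤ a / m ∧ (m : Int) < L)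
      ∧ (divLoop L a d).1.Nodup ∧ (divLoop L a d).2.Nodup := by
  intro n
  induction n using Nat.strong_induction_on with
  | _ n ih =>
    intro d hn hd1
    rw [divLoop]
    by_cases hle : d * d ≤ a
    · have hsq : d * d < (d + 1) * (d + 1) := by nlinarith
      obtain ⟨ihs, ihl, ihns, ihnl⟩ :=
        ih (a + 1 - (d + 1) * (d + 1)) (by omega) (d + 1) rfl (by omega)
      rw [dif_pos hle]
      by_cases hmod : a % d = 0
      · have hdvd : d ∣ a := Nat.dvd_of_mod_eq_zero hmod
        have hede : d * (a / d) = a := Nat.mul_div_cancel' hdvd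
        have heda : a / d ∣ a := Nat.div_dvd_of_dvd hdvd
        have hdad : a / (a / d) = d := Nat.div_div_self hdvd (by omega)
        rw [if_pos hmod]
        refine ⟨?_, ?_, ?_, ?_⟩
        · intro i
          simp only []
          constructor
          · intro hi
            by_cases hdL : (d : Int) < L
            · rw [if_pos hdL] at hi
              rcases List.mem_cons.1 hi with h | h
              · exact ⟨d, h, le_refl d, hle, hdvd, hdL⟩
              · obtain ⟨m, hm1, hm2, hm3, hm4, hm5⟩ := (ihs i).1 h
                exact ⟨m, hm1, by omega, hm3, hm4, hm5⟩
            · rw [if_neg hdL] at hi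
              obtain ⟨m, hm1, hm2, hm3, hm4, hm5⟩ := (ihs i).1 hi
              exact ⟨m, hm1, by omega, hm3, hm4, hm5⟩
          · rintro ⟨m, hm1, hm2, hm3, hm4, hm5⟩
            rcases eq_or_lt_of_le hm2 with h | h
            · subst h
              rw [if_pos (hm1 ▸ hm5 : (d : Int) < L)]
              simp [hm1]
            · have hmem : i ∈ (divLoop L a (d + 1)).1 :=
                (ihs i).2 ⟨m, hm1, by omega, hm3, hm4, hm5⟩
              split <;> simp [hmem]
        · intro i
          simp only []
          constructor
          · intro hi
            by_cases hcond : a / d ≠ d ∧ ((a / d : Nat) : Int) < L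
            · rw [if_pos hcond] at hi
              rcases List.mem_cons.1 hi with h | h
              · refine ⟨a / d, h, heda, ?_, by omega, hcond.2⟩
                have hda : d ≤ a / d := (Nat.le_div_iff_mul_le (by omega)).2 hle
                have hlt : d < a / d := lt_of_le_of_ne hda (fun he => hcond.1 he.symm)
                nlinarith [hede, hlt]
              · obtain ⟨m, hm1, hm2, hm3, hm4, hm5⟩ := (ihl i).1 h
                exact ⟨m, hm1, hm2, hm3, by omega, hm5⟩
            · rw [if_neg hcond] at hi
              obtain ⟨m, hm1, hm2, hm3, hm4, hm5⟩ := (ihl i).1 hi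
              exact ⟨m, hm1, hm2, hm3, by omega, hm5⟩
          · rintro ⟨m, hm1, hm2, hm3, hm4, hm5⟩
            have hma : m ≤ a := Nat.le_of_dvd ha hm2
            have hm0 : 0 < m := by
              rcases Nat.eq_zero_or_pos m with h | h
              · subst h; simp at hm2; omega
              · exact h
            have hjm : (a / m) * m = a := Nat.div_mul_cancel hm2
            rcases eq_or_lt_of_le hm4 with h | h
            · -- a / m = d, so m = a / d
              have hmad : m = a / d := by
                have := Nat.div_div_self hm2 (by omega)
                rw [← h] at this
                omega
              have hed : a / d ≠ d := by
                intro he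
                rw [← hmad] at he
                subst he
                omega
              rw [if_pos ⟨hed, by rw [← hmad]; exact hm5⟩]
              rw [hm1, hmad]
              exact List.mem_cons_self
            · have hmem : i ∈ (divLoop L a (d + 1)).2 :=
                (ihl i).2 ⟨m, hm1, hm2, hm3, by omega, hm5⟩
              split <;> simp [hmem]
        · simp only []
          split
          · refine List.Nodup.cons (fun hmem => ?_) ihns
            obtain ⟨m, hm1, hm2, _, _, _⟩ := (ihs _).1 hmem
            have : d = m := by exact_mod_cast hm1
            omega
          · exact ihns
        · simp only []
          split
          · rename_i hcond
            refine List.Nodup.cons (fun hmem => ?_) ihnl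
            obtain ⟨m, hm1, hm2, hm3, hm4, _⟩ := (ihl _).1 hmem
            have hme : a / d = m := by exact_mod_cast hm1
            subst hme
            omega
          · exact ihnl
      · have hnd : ¬ d ∣ a := fun h => hmod (Nat.mod_eq_zero_of_dvd h)
        rw [if_neg hmod]
        refine ⟨?_, ?_, ihns, ihnl⟩
        · intro i
          rw [ihs i]
          constructor
          · rintro ⟨m, hm1, hm2, hm3, hm4, hm5⟩
            exact ⟨m, hm1, by omega, hm3, hm4, hm5⟩
          · rintro ⟨m, hm1, hm2, hm3, hm4, hm5⟩
            rcases eq_or_lt_of_le hm2 with h | h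
            · subst h; exact absurd hm4 hnd
            · exact ⟨m, hm1, by omega, hm3, hm4, hm5⟩
        · intro i
          rw [ihl i]
          constructor
          · rintro ⟨m, hm1, hm2, hm3, hm4, hm5⟩
            exact ⟨m, hm1, hm2, hm3, by omega, hm5⟩
          · rintro ⟨m, hm1, hm2, hm3, hm4, hm5⟩
            rcases eq_or_lt_of_le hm4 with h | h
            · exfalso
              have : a / m ∣ a := Nat.div_dvd_of_dvd hm2
              rw [← h] at this
              exact hnd this
            · exact ⟨m, hm1, hm2, hm3, by omega, hm5⟩
    · rw [dif_neg hle]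
      refine ⟨?_, ?_, List.nodup_nil, List.nodup_nil⟩
      · intro i
        simp only [List.not_mem_nil, false_iff]
        rintro ⟨m, _, hm2, hm3, _, _⟩
        have : d * d ≤ m * m := Nat.mul_le_mul hm2 hm2
        omega
      · intro i
        simp only [List.not_mem_nil, false_iff]
        rintro ⟨m, _, hm2, hm3, hm4, _⟩
        have hma : m ≤ a := Nat.le_of_dvd ha hm2
        have hm0 : 0 < m := by
          rcases Nat.eq_zero_or_pos m with h | h
          · subst h; simp at hm2; omega
          · exact h
        have hjm : (a / m) * m = a := Nat.div_mul_cancel hm2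
        have hjlt : a / m < m := by nlinarith
        have : (a / m) * (a / m) ≤ (a / m) * m := Nat.mul_le_mul_left _ (le_of_lt hjlt)
        have hdd : d * d ≤ (a / m) * (a / m) := Nat.mul_le_mul hm4 hm4
        omega

-- the key list B touches for one barber
def pvKp (L : Int) (M : Int) : List Int :=
  if M = 0 then PySem.List.pyRange 1 L
  else (divLoop L M.natAbs 1).1 ++ (divLoop L M.natAbs 1).2

theorem pv_cast_dvd (m : Nat) (M : Int) : (m : Int) ∣ M ↔ m ∣ M.natAbs := by
  rw [← Int.natAbs_dvd_natAbs]
  simp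

theorem pvKp_mem (L M : Int) (v : Int) :
    v ∈ pvKp L M ↔ 1 ≤ v ∧ v < L ∧ v ∣ M := by
  unfold pvKp
  by_cases hM : M = 0
  · subst hM
    simp [PySem.List.mem_pyRange_one, and_comm]
  · have ha : 0 < M.natAbs := Int.natAbs_pos.2 hM
    obtain ⟨hs, hl, _, _⟩ := divLoop_spec L M.natAbs ha _ 1 rfl (le_refl 1)
    rw [if_neg hM, List.mem_append, hs v, hl v]
    constructor
    · rintro (⟨m, hm1, hm2, hm3, hm4, hm5⟩ | ⟨m, hm1, hm2, hm3, hm4, hm5⟩)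
      · subst hm1
        exact ⟨by exact_mod_cast hm2, hm5, (pv_cast_dvd m M).2 hm4⟩
      · subst hm1
        have hm0 : 0 < m := by
          rcases Nat.eq_zero_or_pos m with h | h
          · subst h; simp at hm2; omega
          · exact h
        exact ⟨by exact_mod_cast hm0, hm5, (pv_cast_dvd m M).2 hm2⟩
    · rintro ⟨h1, h2, h3⟩
      have hv : v = ((v.toNat : Nat) : Int) := by omega
      set m := v.toNat with hmdef
      have hmd : m ∣ M.natAbs := (pv_cast_dvd m M).1 (hv ▸ h3)
      have hm1 : 1 ≤ m := by omega
      by_cases hsq : m * m ≤ M.natAbs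
      · exact Or.inl ⟨m, hv, hm1, hsq, hmd, hv ▸ h2⟩
      · refine Or.inr ⟨m, hv, hmd, by omega, ?_, hv ▸ h2⟩
        have hma : m ≤ M.natAbs := Nat.le_of_dvd ha hmd
        exact (Nat.le_div_iff_mul_le (by omega)).2 (by omega)

theorem pvKp_nodup (L M : Int) : (pvKp L M).Nodup := by
  unfold pvKp
  by_cases hM : M = 0
  · subst hM
    rw [if_pos rfl]
    exact PySem.List.nodup_pyRange_one 1 L
  · have ha : 0 < M.natAbs := Int.natAbs_pos.2 hM
    obtain ⟨hs, hl, hns, hnl⟩ := divLoop_spec L M.natAbs ha _ 1 rfl (le_refl 1)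
    rw [if_neg hM]
    refine List.Nodup.append hns hnl ?_
    intro v hv1 hv2
    obtain ⟨m, hm1, _, hm3, _, _⟩ := (hs v).1 hv1
    obtain ⟨m', hm1', _, hm3', _, _⟩ := (hl v).1 hv2
    have hmm : m = m' := by rw [hm1] at hm1'; exact_mod_cast hm1'
    subst hmm
    omega

-- counts accumulation: per-input contribution of each barber
def pvC (L v : Int) : List (Int × Int) → Int
  | [] => 0
  | p :: t => p.2 * ((pvKp L p.1).count v : Int) + pvC L v t

theorem pvC_eq_pvS (L v : Int) (h1 : 1 ≤ v) (h2 : v < L) (Ms : List (Int × Int)) :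
    pvC L v Ms = pvS v Ms := by
  induction Ms with
  | nil => rfl
  | cons p t ih =>
    rw [pvC, pvS, ih]
    by_cases hd : v ∣ p.1
    · rw [List.count_eq_one_of_mem (pvKp_nodup L p.1) ((pvKp_mem L p.1 v).2 ⟨h1, h2, hd⟩)]
      simp [hd]
    · rw [List.count_eq_zero_of_not_mem (fun hm => hd ((pvKp_mem L p.1 v).1 hm).2.2)]
      simp [hd]

theorem bump_getD (freq : Int) (ks : List Int) :
    ∀ (c : PySem.Dict Int Int) (v : Int),
      (ks.foldl (fun c i => c.insert i (c.getD i 0 + freq)) c).getD v 0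
        = c.getD v 0 + freq * (ks.count v) := by
  induction ks with
  | nil => intro c v; simp
  | cons k t ih =>
    intro c v
    simp only [List.foldl_cons]
    rw [ih, PySem.Dict.getD_insert]
    by_cases h : v = k
    · subst h; simp; ring
    · simp [h, Ne.symm h]

theorem counts_fold_getD (L : Int) (Ms : List (Int × Int)) :
    ∀ (c : PySem.Dict Int Int) (v : Int),
      (Ms.foldl (fun c p =>
          if p.1 = 0 then
            (PySem.List.pyRange 1 L).foldl (fun c i => c.insert i (c.getD i 0 + p.2)) c
          else
            let dl := divLoop L p.1.natAbs 1
            (dl.1 ++ dl.2).foldl (fun c i => c.insert i (c.getD i 0 + p.2)) c) c).getD v 0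
        = c.getD v 0 + pvC L v Ms := by
  induction Ms with
  | nil => intro c v; simp [pvC]
  | cons p t ih =>
    intro c v
    simp only [List.foldl_cons]
    rw [ih, pvC]
    by_cases hp : p.1 = 0
    · rw [if_pos hp, bump_getD, pvKp, if_pos hp]
      ring
    · rw [if_neg hp]
      rw [bump_getD, pvKp, if_neg hp]
      ring

theorem counts_fold_keys_mem (L : Int) (Ms : List (Int × Int)) :
    ∀ (c : PySem.Dict Int Int) (v : Int),
      v ∈ (Ms.foldl (fun c p =>
          if p.1 = 0 then
            (PySem.List.pyRange 1 L).foldl (fun c i => c.insert i (c.getD i 0 + p.2)) c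
          else
            let dl := divLoop L p.1.natAbs 1
            (dl.1 ++ dl.2).foldl (fun c i => c.insert i (c.getD i 0 + p.2)) c) c).keys
        ↔ v ∈ c.keys ∨ ∃ p ∈ Ms, v ∈ pvKp L p.1 := by
  induction Ms with
  | nil => intro c v; simp
  | cons p t ih =>
    intro c v
    simp only [List.foldl_cons]
    rw [ih]
    have hstep : ∀ (ks : List Int),
        v ∈ (ks.foldl (fun c i => c.insert i (c.getD i 0 + p.2)) c).keys ↔ v ∈ c.keys ∨ v ∈ ks := by
      intro ks
      rw [PySem.Dict.keys_foldl_insert]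
      exact PySem.Set.mem_update c.keys ks v
    by_cases hp : p.1 = 0
    · rw [if_pos hp, hstep]
      simp only [List.mem_cons]
      constructor
      · rintro ((h | h) | h)
        · exact Or.inl h
        · exact Or.inr ⟨p, Or.inl rfl, by rw [pvKp, if_pos hp]; exact h⟩
        · obtain ⟨q, hq1, hq2⟩ := h
          exact Or.inr ⟨q, Or.inr hq1, hq2⟩
      · rintro (h | ⟨q, hq1 | hq1, hq2⟩)
        · exact Or.inl (Or.inl h)
        · subst hq1
          rw [pvKp, if_pos hp] at hq2
          exact Or.inl (Or.inr hq2)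
        · exact Or.inr ⟨q, hq1, hq2⟩
    · rw [if_neg hp]
      rw [hstep]
      simp only [List.mem_cons]
      constructor
      · rintro ((h | h) | h)
        · exact Or.inl h
        · exact Or.inr ⟨p, Or.inl rfl, by rw [pvKp, if_neg hp]; exact h⟩
        · obtain ⟨q, hq1, hq2⟩ := h
          exact Or.inr ⟨q, Or.inr hq1, hq2⟩
      · rintro (h | ⟨q, hq1 | hq1, hq2⟩)
        · exact Or.inl (Or.inl h)
        · subst hq1
          rw [pvKp, if_neg hp] at hq2
          exact Or.inl (Or.inr hq2)
        · exact Or.inr ⟨q, hq1, hq2⟩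

theorem counts_fold_keys_nodup (L : Int) (Ms : List (Int × Int)) :
    ∀ (c : PySem.Dict Int Int), c.keys.Nodup →
      (Ms.foldl (fun c p =>
          if p.1 = 0 then
            (PySem.List.pyRange 1 L).foldl (fun c i => c.insert i (c.getD i 0 + p.2)) c
          else
            let dl := divLoop L p.1.natAbs 1
            (dl.1 ++ dl.2).foldl (fun c i => c.insert i (c.getD i 0 + p.2)) c) c).keys.Nodup := by
  induction Ms with
  | nil => intro c h; exact h
  | cons p t ih =>
    intro c h
    simp only [List.foldl_cons]
    refine ih _ ?_
    by_cases hp : p.1 = 0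
    · rw [if_pos hp]
      exact PySem.Dict.nodup_keys_foldl_insert _ _ _ h
    · rw [if_neg hp]
      exact PySem.Dict.nodup_keys_foldl_insert _ _ _ h

theorem minutes_alt_eq_pvT (N : Int) (Ms : List (Int × Int)) :
    minutes_alt N Ms = pvT (N * 10000) Ms := by
  unfold minutes_alt pvT
  show ((PySem.List.sorted (Ms.foldl (fun c p =>
      if p.1 = 0 then
        (PySem.List.pyRange 1 (N * 10000)).foldl (fun c i => c.insert i (c.getD i 0 + p.2)) c
      else
        let dl := divLoop (N * 10000) p.1.natAbs 1
        (dl.1 ++ dl.2).foldl (fun c i => c.insert i (c.getD i 0 + p.2)) c)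
      (PySem.Dict.empty : PySem.Dict Int Int)).keys (fun x => x)).foldl
      (fun r i => r.insert i ((Ms.foldl (fun c p =>
        if p.1 = 0 then
          (PySem.List.pyRange 1 (N * 10000)).foldl (fun c i => c.insert i (c.getD i 0 + p.2)) c
        else
          let dl := divLoop (N * 10000) p.1.natAbs 1
          (dl.1 ++ dl.2).foldl (fun c i => c.insert i (c.getD i 0 + p.2)) c)
        (PySem.Dict.empty : PySem.Dict Int Int)).getD i 0))
      ((PySem.Dict.empty : PySem.Dict Int Int).insert 0 (Ms.length : Int))).items
    = (0, (Ms.length : Int)) ::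
        ((PySem.List.pyRange 1 (N * 10000)).filter
          (fun i => Ms.any (fun p => decide (i ∣ p.1)))).map (fun i => (i, pvS i Ms))
  set C := Ms.foldl (fun c p =>
      if p.1 = 0 then
        (PySem.List.pyRange 1 (N * 10000)).foldl (fun c i => c.insert i (c.getD i 0 + p.2)) c
      else
        let dl := divLoop (N * 10000) p.1.natAbs 1
        (dl.1 ++ dl.2).foldl (fun c i => c.insert i (c.getD i 0 + p.2)) c)
    (PySem.Dict.empty : PySem.Dict Int Int) with hC
  set FR := (PySem.List.pyRange 1 (N * 10000)).filter
      (fun i => Ms.any (fun p => decide (i ∣ p.1))) with hFR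
  have hkeysnodup : C.keys.Nodup :=
    counts_fold_keys_nodup (N * 10000) Ms PySem.Dict.empty PySem.Dict.nodup_keys_empty
  have hkeysmem : ∀ v, v ∈ C.keys ↔ ∃ p ∈ Ms, v ∈ pvKp (N * 10000) p.1 := by
    intro v
    rw [hC, counts_fold_keys_mem]
    simp [PySem.Dict.keys_empty]
  have hFRnodup : FR.Nodup := (PySem.List.nodup_pyRange_one 1 (N * 10000)).filter _
  have hFRmem : ∀ v, v ∈ FR ↔ ∃ p ∈ Ms, v ∈ pvKp (N * 10000) p.1 := by
    intro v
    rw [hFR, List.mem_filter]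
    constructor
    · rintro ⟨hr, hany⟩
      obtain ⟨h1, h2⟩ := PySem.List.mem_pyRange_one.1 hr
      obtain ⟨p, hp1, hp2⟩ := List.any_eq_true.1 hany
      exact ⟨p, hp1, (pvKp_mem _ _ _).2 ⟨h1, h2, of_decide_eq_true hp2⟩⟩
    · rintro ⟨p, hp1, hp2⟩
      obtain ⟨h1, h2, h3⟩ := (pvKp_mem _ _ _).1 hp2
      exact ⟨PySem.List.mem_pyRange_one.2 ⟨h1, h2⟩,
        List.any_eq_true.2 ⟨p, hp1, decide_eq_true h3⟩⟩
  have hsorted : PySem.List.sorted C.keys (fun x => x) = FR :=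
    PySem.List.sorted_eq_of_perm_of_pairwise_lt _ _ _
      ((List.perm_ext_iff_of_nodup hFRnodup hkeysnodup).2
        (fun v => (hFRmem v).trans (hkeysmem v).symm))
      ((PySem.List.pairwise_lt_pyRange_one 1 (N * 10000)).filter _)
  rw [hsorted]
  have hFRpos : ∀ i ∈ FR, 1 ≤ i ∧ i < N * 10000 := by
    intro i hi
    exact PySem.List.mem_pyRange_one.1 (List.mem_of_mem_filter hi)
  have hfresh : ∀ i ∈ FR,
      ((PySem.Dict.empty : PySem.Dict Int Int).insert 0 (Ms.length : Int)).contains i = false := by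
    intro i hi
    rcases h : ((PySem.Dict.empty : PySem.Dict Int Int).insert 0 (Ms.length : Int)).contains i
      with _ | _
    · rfl
    · exfalso
      have := (PySem.Dict.contains_iff_mem_keys _ _).1 h
      rw [PySem.Dict.keys_insert_of_not_contains _ _ (PySem.Dict.contains_empty 0),
        PySem.Dict.keys_empty] at this
      simp at this
      have := hFRpos i hi
      omega
  rw [PySem.Dict.items_foldl_insert_fresh FR (fun i => i) (fun i => C.getD i 0) _ hfresh
    (by simpa using hFRnodup)]
  rw [PySem.Dict.items_insert_of_not_contains _ _ (PySem.Dict.contains_empty 0)]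
  have hval : ∀ i ∈ FR, C.getD i 0 = pvS i Ms := by
    intro i hi
    obtain ⟨h1, h2⟩ := hFRpos i hi
    rw [hC, counts_fold_getD, PySem.Dict.getD_of_not_contains _ _ (PySem.Dict.contains_empty i),
      zero_add]
    exact pvC_eq_pvS _ _ h1 h2 Ms
  rw [List.map_congr_left (fun i hi => by rw [hval i hi])]
  rfl

-- ===== VERDICT (by name: the statement is the Claim_ definition above) =====
theorem minutes_spec : Claim_equal_minutes := by
  intro N Ms _
  unfold Spec_minutes
  rw [minutes_eq_pvT, minutes_alt_eq_pvT]
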